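-- pv_equiv track=rewrite | github.com/anroMK/codewars-python | 7kyu/basicSequencePractice.py | sum_of_n_v2
-- ===== SOURCE A (Python) =====
-- def sum_of_n_v2(n):
--     current = 0
--     list = []
--     sign = 1
--     if n < 0: sign = -1
--     for i in range(abs(n)+1):
--         current +=(i*sign)
--         list.append(current)
--     return list
-- ===== SOURCE B (Python) =====
-- def sum_of_n_v2(n):
--     m = abs(n)
--     out = []
--     t = m * (m + 1) // 2
--     k = m
--     while k >= 0:
--         out.append(t if n >= 0 else -t)
--         t -= k
--         k -= 1
--     out.reverse()
--     return out
-- ===== Notes on version B (the rewrite author's own statement) =====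
-- stated objective: alternative
-- what changed: Instead of accumulating partial sums forward, B starts from the total triangular number of abs(n) and builds the list back-to-front by subtracting k at each step, then reverses it.
import Mathlib
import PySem

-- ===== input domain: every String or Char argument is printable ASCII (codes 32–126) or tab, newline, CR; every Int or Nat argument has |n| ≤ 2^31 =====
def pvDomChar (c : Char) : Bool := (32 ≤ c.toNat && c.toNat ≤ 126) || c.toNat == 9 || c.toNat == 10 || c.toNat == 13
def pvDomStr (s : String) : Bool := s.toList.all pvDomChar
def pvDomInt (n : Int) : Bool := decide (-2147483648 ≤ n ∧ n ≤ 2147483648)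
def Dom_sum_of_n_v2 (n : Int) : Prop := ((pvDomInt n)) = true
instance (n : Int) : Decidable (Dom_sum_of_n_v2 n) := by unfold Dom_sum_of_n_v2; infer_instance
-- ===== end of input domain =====

-- B builds the list back-to-front, starting from the total triangular number and
-- subtracting k at each step, then reverses (objective: alternative decomposition).

-- ===== PORT A =====
def sum_of_n_v2 (n : Int) : List Int :=
  let sign : Int := if n < 0 then -1 else 1
  ((PySem.List.pyRange 0 ((n.natAbs : Int) + 1) 1).foldl
    (fun (st : Int × List Int) i => (st.1 + i * sign, st.2 ++ [st.1 + i * sign]))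
    (0, [])).2

-- ===== PORT B =====
-- the while-loop of Source B: k counts down from m to 0, t is the current partial sum,
-- elements are appended in descending order
def pvDownLoop (neg : Bool) : Nat → Int → List Int
  | 0, t => [if neg then -t else t]
  | (k+1), t => (if neg then -t else t) :: pvDownLoop neg k (t - ((k:Int) + 1))

def sum_of_n_v2_alt (n : Int) : List Int :=
  let m : Nat := n.natAbs
  (pvDownLoop (decide (n < 0)) m (PySem.Int.floordiv ((m:Int) * ((m:Int) + 1)) 2)).reverse

-- ===== PRECONDITION & SPEC =====
def Spec_sum_of_n_v2 (n : Int) (out : List Int) : Prop := out = sum_of_n_v2_alt n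
instance (n : Int) (out : List Int) : Decidable (Spec_sum_of_n_v2 n out) := by unfold Spec_sum_of_n_v2; infer_instance

-- ===== CLAIM (what is proved, stated in full; the proofs are below) =====
def Claim_equal_sum_of_n_v2 : Prop := ∀ (n : Int), Dom_sum_of_n_v2 n → Spec_sum_of_n_v2 n (sum_of_n_v2 n)

-- ===== LEMMAS AND PROOFS =====

lemma tri_step (m : Nat) : ((m:Int) - 1) * m / 2 + m = (m:Int) * (m + 1) / 2 := by
  have h2 : (m:Int) * (m + 1) = ((m:Int) - 1) * m + m * 2 := by ring
  rw [h2, Int.add_mul_ediv_right _ _ (by norm_num : (2:Int) ≠ 0)]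

-- A's loop produces (final accumulator, list of signed triangular numbers 0..m-1)
lemma loop_char (sign : Int) : ∀ (m : Nat),
    ((PySem.List.pyRange 0 (m : Int) 1).foldl
      (fun (st : Int × List Int) i => (st.1 + i * sign, st.2 ++ [st.1 + i * sign]))
      (0, []))
    = (sign * (((m:Int) - 1) * m / 2),
       (PySem.List.pyRange 0 (m : Int) 1).map (fun i => sign * (i * (i + 1) / 2))) := by
  intro m
  induction m with
  | zero =>
    rw [show ((0:Nat):Int) = 0 from rfl, PySem.List.pyRange_one_eq_nil (le_refl 0)]
    simp
  | succ m ih =>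
    have hsplit : PySem.List.pyRange 0 ((m + 1 : Nat) : Int) 1
        = PySem.List.pyRange 0 (m : Int) 1 ++ [(m : Int)] := by
      have := PySem.List.pyRange_one_succ_right (a := 0) (b := (m : Int)) (Int.natCast_nonneg m)
      rw [← this]; norm_cast
    rw [hsplit, List.foldl_append, ih, List.map_append]
    simp only [List.foldl_cons, List.foldl_nil, List.map_cons, List.map_nil]
    have key : sign * (((m:Int) - 1) * m / 2) + (m:Int) * sign
        = sign * ((m:Int) * ((m:Int) + 1) / 2) := by
      rw [← tri_step m]; ring
    have h1 : ((m + 1 : Nat) : Int) - 1 = (m : Int) := by push_cast; ring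
    rw [key, h1]; norm_cast

-- B's countdown loop, started at the k-th triangular number, is the reverse of
-- the signed triangular numbers 0..k
lemma down_char (neg : Bool) : ∀ (k : Nat),
    pvDownLoop neg k ((k:Int) * ((k:Int) + 1) / 2)
    = ((PySem.List.pyRange 0 ((k:Int) + 1) 1).map
        (fun i => (if neg then (-1:Int) else 1) * (i * (i + 1) / 2))).reverse := by
  intro k
  induction k with
  | zero => cases neg <;> decide
  | succ k ih =>
    have harg : ((k+1:Nat):Int) * (((k+1:Nat):Int) + 1) / 2 - (((k:Int)) + 1)
        = (k:Int) * ((k:Int) + 1) / 2 := by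
      have h := tri_step (k+1)
      have h' : (((k+1:Nat)):Int) - 1 = (k:Int) := by push_cast; ring
      rw [h'] at h
      push_cast at h ⊢
      linarith
    have hsplit : PySem.List.pyRange 0 (((k+1:Nat):Int) + 1) 1
        = PySem.List.pyRange 0 ((k:Int) + 1) 1 ++ [((k:Int) + 1)] := by
      have := PySem.List.pyRange_one_succ_right (a := 0) (b := ((k:Int) + 1))
        (by positivity)
      rw [← this]; norm_cast
    show (if neg then -(((k+1:Nat):Int) * (((k+1:Nat):Int) + 1) / 2)
          else ((k+1:Nat):Int) * (((k+1:Nat):Int) + 1) / 2)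
        :: pvDownLoop neg k (((k+1:Nat):Int) * (((k+1:Nat):Int) + 1) / 2 - ((k:Int) + 1)) = _
    rw [harg, ih, hsplit, List.map_append, List.reverse_append]
    have hval : (if neg then -(((k+1:Nat):Int) * (((k+1:Nat):Int) + 1) / 2)
          else ((k+1:Nat):Int) * (((k+1:Nat):Int) + 1) / 2)
        = (if neg then (-1:Int) else 1) * (((k:Int)+1) * (((k:Int)+1) + 1) / 2) := by
      cases neg <;> simp only [Bool.false_eq_true, if_false, if_true] <;> push_cast <;> ring
    rw [hval]; simp

-- ===== VERDICT (by name: the statement is the Claim_ definition above) =====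
theorem sum_of_n_v2_spec : Claim_equal_sum_of_n_v2 := by
  intro n _
  unfold Spec_sum_of_n_v2 sum_of_n_v2 sum_of_n_v2_alt
  have hfd : PySem.Int.floordiv ((n.natAbs:Int) * ((n.natAbs:Int) + 1)) 2
      = (n.natAbs:Int) * ((n.natAbs:Int) + 1) / 2 :=
    PySem.Int.floordiv_eq_ediv_of_pos (by norm_num)
  simp only [hfd]
  rw [down_char, List.reverse_reverse]
  have h := loop_char (if n < 0 then -1 else 1) (n.natAbs + 1)
  push_cast at h
  rw [Int.abs_eq_natAbs] at h
  rw [h]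
  have hsg : (if n < 0 then (-1:Int) else 1) = (if decide (n < 0) then (-1:Int) else 1) := by
    by_cases h : n < 0 <;> simp [h]
  rw [hsg]
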